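-- pv_equiv track=rewrite | github.com/jjwatt/aoc2025 | puzzle4.py | check_grid_accessible
-- ===== SOURCE A (Python) =====
-- def check_neighbors(grid, row, col):
--     """Check adjacent grid cells to see if they meet requirements.
--
--     Check to see if adjacent grid cells have fewer than 4 @s.
--     """
--     rows = len(grid)
--     cols = len(grid[0])
--     neighbors = 0
--     deltas = [
--         (-1, -1), (-1, 0), (-1, 1),
--         (0, -1),           (0, 1),
--         (1, -1),  (1, 0),  (1, 1)
--     ]
--     for dr, dc in deltas:
--         nr, nc = row + dr, col + dc
--         if 0 <= nr < rows and 0 <= nc < cols: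
--             if grid[nr][nc] == '@':
--                 neighbors += 1
--     return neighbors < 4
--
-- def check_grid_accessible(grid):
--     """Check for the number of accessible slots in the grid."""
--     rows = len(grid)
--     cols = len(grid[0])
--     accessible = 0
--     for row in range(rows):
--         for col in range(cols):
--             if grid[row][col] == '@':
--                 if check_neighbors(grid, row, col):
--                     accessible += 1
--     return accessible
-- ===== SOURCE B (Python) =====
-- def check_grid_accessible(grid):
--     """Check for the number of accessible slots in the grid.
--
--     Scatter pass: every '@' cell adds 1 to the neighbor-count of each
--     in-bounds neighbor; then count '@' cells whose count is < 4.
--     """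
--     rows = len(grid)
--     cols = len(grid[0])
--     counts = {}
--     for r in range(rows):
--         for c in range(cols):
--             if grid[r][c] == '@':
--                 for nr in (r - 1, r, r + 1):
--                     for nc in (c - 1, c, c + 1):
--                         if (nr != r or nc != c) and 0 <= nr < rows and 0 <= nc < cols:
--                             counts[(nr, nc)] = counts.get((nr, nc), 0) + 1
--     accessible = 0
--     for r in range(rows):
--         for c in range(cols):
--             if grid[r][c] == '@' and counts.get((r, c), 0) < 4:
--                 accessible += 1
--     return accessible
-- ===== Notes on version B (the rewrite author's own statement) =====
-- stated objective: alternative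
-- what changed: Replaces A's per-cell gather (calling check_neighbors to scan the 8 deltas around each '@' cell) by a scatter pass that builds a neighbor-count table once (each '@' cell increments its in-bounds neighbors' entries in a dict) followed by a tally pass over '@' cells with count < 4.
import Mathlib
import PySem

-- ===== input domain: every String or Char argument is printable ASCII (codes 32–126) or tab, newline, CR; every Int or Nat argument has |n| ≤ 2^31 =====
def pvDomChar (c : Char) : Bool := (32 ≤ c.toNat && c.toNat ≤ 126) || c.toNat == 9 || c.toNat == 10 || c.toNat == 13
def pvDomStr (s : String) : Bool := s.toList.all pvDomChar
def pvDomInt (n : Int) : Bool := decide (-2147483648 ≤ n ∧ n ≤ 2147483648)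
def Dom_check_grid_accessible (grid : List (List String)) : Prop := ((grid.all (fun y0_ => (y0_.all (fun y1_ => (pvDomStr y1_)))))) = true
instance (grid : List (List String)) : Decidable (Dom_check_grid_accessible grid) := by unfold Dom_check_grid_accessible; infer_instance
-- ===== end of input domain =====

-- B replaces A's per-cell gather of the 8 neighbors by a scatter pass (every '@' cell
-- increments a shared neighbor-count table) followed by a tally pass; alternative
-- decomposition, same asymptotic cost.

-- ===== PORT A =====
def check_neighbors (grid : List (List String)) (row col : Int) : Bool :=
  let rows : Int := grid.length
  let cols : Int := (PySem.List.pyGetD grid 0 []).length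
  let deltas : List (Int × Int) :=
    [(-1, -1), (-1, 0), (-1, 1), (0, -1), (0, 1), (1, -1), (1, 0), (1, 1)]
  let neighbors : Int := deltas.foldl (fun neighbors d =>
    let nr := row + d.1
    let nc := col + d.2
    if 0 ≤ nr ∧ nr < rows ∧ 0 ≤ nc ∧ nc < cols then
      if PySem.List.pyGetD (PySem.List.pyGetD grid nr []) nc "" == "@" then neighbors + 1
      else neighbors
    else neighbors) 0
  neighbors < 4

def check_grid_accessible (grid : List (List String)) : Int :=
  let rows : Int := grid.length
  let cols : Int := (PySem.List.pyGetD grid 0 []).length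
  (PySem.List.pyRange 0 rows 1).foldl (fun acc row =>
    (PySem.List.pyRange 0 cols 1).foldl (fun acc col =>
      if PySem.List.pyGetD (PySem.List.pyGetD grid row []) col "" == "@" then
        if check_neighbors grid row col then acc + 1 else acc
      else acc) acc) 0

-- ===== PORT B =====
def check_grid_accessible_alt (grid : List (List String)) : Int :=
  let rows : Int := grid.length
  let cols : Int := (PySem.List.pyGetD grid 0 []).length
  let counts : PySem.Dict (Int × Int) Int :=
    (PySem.List.pyRange 0 rows 1).foldl (fun counts r =>
      (PySem.List.pyRange 0 cols 1).foldl (fun counts c =>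
        if PySem.List.pyGetD (PySem.List.pyGetD grid r []) c "" == "@" then
          [r - 1, r, r + 1].foldl (fun counts nr =>
            [c - 1, c, c + 1].foldl (fun counts nc =>
              if (nr ≠ r ∨ nc ≠ c) ∧ 0 ≤ nr ∧ nr < rows ∧ 0 ≤ nc ∧ nc < cols then
                counts.insert (nr, nc) (counts.getD (nr, nc) 0 + 1)
              else counts) counts) counts
        else counts) counts) PySem.Dict.empty
  (PySem.List.pyRange 0 rows 1).foldl (fun acc r =>
    (PySem.List.pyRange 0 cols 1).foldl (fun acc c =>
      if PySem.List.pyGetD (PySem.List.pyGetD grid r []) c "" == "@" ∧ counts.getD (r, c) 0 < 4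
      then acc + 1 else acc) acc) 0

-- ===== PRECONDITION & SPEC =====
-- Pre_ excludes exactly the inputs where Python A raises IndexError: the empty grid
-- (len(grid[0])) and ragged grids with a row shorter than the first row.
def Pre_check_grid_accessible (grid : List (List String)) : Prop :=
  grid ≠ [] ∧ ∀ row ∈ grid, (grid.headD []).length ≤ row.length
instance (grid : List (List String)) : Decidable (Pre_check_grid_accessible grid) := by
  unfold Pre_check_grid_accessible; infer_instance
def pvWitness_check_grid_accessible : List (List String) :=
  [["@", "."], [".", "@"]]
def Spec_check_grid_accessible (grid : List (List String)) (out : Int) : Prop := out = check_grid_accessible_alt grid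
instance (grid : List (List String)) (out : Int) : Decidable (Spec_check_grid_accessible grid out) := by unfold Spec_check_grid_accessible; infer_instance

-- ===== CLAIM (what is proved, stated in full; the proofs are below) =====
def Claim_equal_check_grid_accessible : Prop := ∀ (grid : List (List String)), Dom_check_grid_accessible grid → Pre_check_grid_accessible grid → Spec_check_grid_accessible grid (check_grid_accessible grid)


-- ===== LEMMAS AND PROOFS =====

def pvCols (grid : List (List String)) : Int := ((PySem.List.pyGetD grid 0 []).length : Int)
def pvAt (grid : List (List String)) (q : Int × Int) : Bool :=
  PySem.List.pyGetD (PySem.List.pyGetD grid q.1 []) q.2 "" == "@"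
def pvD8 : List (Int × Int) :=
  [(-1, -1), (-1, 0), (-1, 1), (0, -1), (0, 1), (1, -1), (1, 0), (1, 1)]
def pvScatter (grid : List (List String)) : PySem.Dict (Int × Int) Int :=
  (PySem.List.pyRange 0 (grid.length : Int) 1).foldl (fun counts r =>
    (PySem.List.pyRange 0 (pvCols grid) 1).foldl (fun counts c =>
      if PySem.List.pyGetD (PySem.List.pyGetD grid r []) c "" == "@" then
        [r - 1, r, r + 1].foldl (fun counts nr =>
          [c - 1, c, c + 1].foldl (fun counts nc =>
            if (nr ≠ r ∨ nc ≠ c) ∧ 0 ≤ nr ∧ nr < (grid.length : Int) ∧ 0 ≤ nc ∧ nc < pvCols grid then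
              counts.insert (nr, nc) (counts.getD (nr, nc) 0 + 1)
            else counts) counts) counts
      else counts) counts) PySem.Dict.empty
def pvNbr (grid : List (List String)) (row col : Int) : Int :=
  pvD8.foldl (fun neighbors d =>
    let nr := row + d.1
    let nc := col + d.2
    if 0 ≤ nr ∧ nr < (grid.length : Int) ∧ 0 ≤ nc ∧ nc < pvCols grid then
      if PySem.List.pyGetD (PySem.List.pyGetD grid nr []) nc "" == "@" then neighbors + 1
      else neighbors
    else neighbors) 0

lemma getD_foldl_delta {alpha : Type} (p : Int × Int) (w : alpha → Int)
    (f : PySem.Dict (Int × Int) Int → alpha → PySem.Dict (Int × Int) Int)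
    (h : ∀ d x, (f d x).getD p 0 = d.getD p 0 + w x) :
    ∀ (l : List alpha) (d0 : PySem.Dict (Int × Int) Int),
      (l.foldl f d0).getD p 0 = d0.getD p 0 + (l.map w).sum := by
  intro l
  induction l with
  | nil => intro d0; simp
  | cons x t ih =>
    intro d0
    rw [List.foldl_cons, ih (f d0 x), h d0 x]
    simp only [List.map_cons, List.sum_cons]
    ring

lemma nbr_countP (grid : List (List String)) (row col : Int) :
    pvNbr grid row col =
      (pvD8.countP (fun d => decide
        ((0 ≤ row + d.1 ∧ row + d.1 < (grid.length : Int) ∧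
          0 ≤ col + d.2 ∧ col + d.2 < pvCols grid) ∧
         pvAt grid (row + d.1, col + d.2) = true)) : Int) := by
  unfold pvNbr
  rw [PySem.List.foldl_congr_mem pvD8 _
    (fun (neighbors : Int) d =>
      if (0 ≤ row + d.1 ∧ row + d.1 < (grid.length : Int) ∧
          0 ≤ col + d.2 ∧ col + d.2 < pvCols grid) ∧
         pvAt grid (row + d.1, col + d.2) = true
      then neighbors + 1 else neighbors) 0 ?_]
  · rw [PySem.List.foldl_ite_add_one]
    simp
  · intro acc x _
    simp only [pvAt]
    split_ifs <;> simp_all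

lemma oneD (x p : Int) :
    ((if p = x - 1 then (1:Int) else 0) + ((if p = x then (1:Int) else 0) + ((if p = x + 1 then (1:Int) else 0) + 0)))
      = if x - 1 ≤ p ∧ p ≤ x + 1 then 1 else 0 := by
  split_ifs <;> omega

lemma Tsplit (rows cols r c p1 p2 a b : Int) :
    (if ((a ≠ r ∨ b ≠ c) ∧ 0 ≤ a ∧ a < rows ∧ 0 ≤ b ∧ b < cols) ∧ (p1 = a ∧ p2 = b)
     then (1:Int) else 0)
    = (if p1 = a then (1:Int) else 0) * ((if p2 = b then (1:Int) else 0) *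
      (if (p1 ≠ r ∨ p2 ≠ c) ∧ 0 ≤ p1 ∧ p1 < rows ∧ 0 ≤ p2 ∧ p2 < cols then 1 else 0)) := by
  by_cases h1 : p1 = a
  · by_cases h2 : p2 = b
    · subst h1; subst h2; simp
    · simp [h2]
  · simp [h1]

lemma window_sum (rows cols r c p1 p2 : Int) :
    (([r - 1, r, r + 1].map (fun nr =>
       ([c - 1, c, c + 1].map (fun nc =>
          if ((nr ≠ r ∨ nc ≠ c) ∧ 0 ≤ nr ∧ nr < rows ∧ 0 ≤ nc ∧ nc < cols) ∧ (p1, p2) = (nr, nc)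
          then (1 : Int) else 0)).sum)).sum) =
      if (p1 ≠ r ∨ p2 ≠ c) ∧ 0 ≤ p1 ∧ p1 < rows ∧ 0 ≤ p2 ∧ p2 < cols ∧
         r - 1 ≤ p1 ∧ p1 ≤ r + 1 ∧ c - 1 ≤ p2 ∧ p2 ≤ c + 1
      then (1 : Int) else 0 := by
  simp only [List.map_cons, List.map_nil, List.sum_cons, List.sum_nil, Prod.mk.injEq, Tsplit]
  have key : ∀ G1 G2 G3 H1 H2 H3 G : Int,
      G1 * (H1 * G) + (G1 * (H2 * G) + (G1 * (H3 * G) + 0)) +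
        (G2 * (H1 * G) + (G2 * (H2 * G) + (G2 * (H3 * G) + 0)) +
          (G3 * (H1 * G) + (G3 * (H2 * G) + (G3 * (H3 * G) + 0)) + 0)) =
      (G1 + (G2 + (G3 + 0))) * ((H1 + (H2 + (H3 + 0))) * G) := by intros; ring
  rw [key, oneD r p1, oneD c p2]
  split_ifs <;> omega

lemma sum_flatMap_pv {alpha beta : Type} (l : List alpha) (f : alpha → List beta) (g : beta → Int) :
    (l.map (fun a => ((f a).map g).sum)).sum = ((l.flatMap f).map g).sum := by
  induction l with
  | nil => simp
  | cons x t ih => simp [List.flatMap_cons, ih]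

lemma d8_facts' (a b : Int) (h : ((a, b) : Int × Int) ∈ pvD8) :
    -1 ≤ a ∧ a ≤ 1 ∧ -1 ≤ b ∧ b ≤ 1 ∧ ¬(a = 0 ∧ b = 0) := by
  simp only [pvD8, List.mem_cons, List.not_mem_nil, or_false, Prod.ext_iff] at h
  omega

lemma mem_d8' (a b : Int) (h : -1 ≤ a ∧ a ≤ 1 ∧ -1 ≤ b ∧ b ≤ 1 ∧ ¬(a = 0 ∧ b = 0)) :
    ((a, b) : Int × Int) ∈ pvD8 := by
  simp only [pvD8, List.mem_cons, List.not_mem_nil, or_false, Prod.ext_iff]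
  omega

lemma scatter_getD (grid : List (List String)) (p1 p2 : Int)
    (h1 : 0 ≤ p1) (h2 : p1 < (grid.length : Int))
    (h3 : 0 ≤ p2) (h4 : p2 < pvCols grid) :
    (pvScatter grid).getD (p1, p2) 0 = pvNbr grid p1 p2 := by
  have hNC : ∀ r c nr (d : PySem.Dict (Int × Int) Int),
      (([c - 1, c, c + 1].foldl (fun counts nc =>
          if (nr ≠ r ∨ nc ≠ c) ∧ 0 ≤ nr ∧ nr < (grid.length : Int) ∧ 0 ≤ nc ∧ nc < pvCols grid then
            counts.insert (nr, nc) (counts.getD (nr, nc) 0 + 1)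
          else counts) d).getD (p1, p2) 0)
        = d.getD (p1, p2) 0 + ([c - 1, c, c + 1].map (fun nc =>
            if ((nr ≠ r ∨ nc ≠ c) ∧ 0 ≤ nr ∧ nr < (grid.length : Int) ∧ 0 ≤ nc ∧ nc < pvCols grid)
               ∧ ((p1 : Int), (p2 : Int)) = (nr, nc)
            then (1 : Int) else 0)).sum := by
    intro r c nr d
    refine getD_foldl_delta (p1, p2) _ _ ?_ _ d
    intro d' nc
    by_cases hcond : (nr ≠ r ∨ nc ≠ c) ∧ 0 ≤ nr ∧ nr < (grid.length : Int) ∧ 0 ≤ nc ∧ nc < pvCols grid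
    · rw [if_pos hcond, PySem.Dict.getD_insert]
      by_cases hpe : ((p1 : Int), (p2 : Int)) = (nr, nc)
      · rw [if_pos hpe, if_pos ⟨hcond, hpe⟩, ← hpe]
      · rw [if_neg hpe, if_neg (fun h => hpe h.2)]; ring
    · rw [if_neg hcond, if_neg (fun h => hcond h.1)]; ring
  have hNR : ∀ r c (d : PySem.Dict (Int × Int) Int),
      (([r - 1, r, r + 1].foldl (fun counts nr =>
          [c - 1, c, c + 1].foldl (fun counts nc =>
            if (nr ≠ r ∨ nc ≠ c) ∧ 0 ≤ nr ∧ nr < (grid.length : Int) ∧ 0 ≤ nc ∧ nc < pvCols grid then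
              counts.insert (nr, nc) (counts.getD (nr, nc) 0 + 1)
            else counts) counts) d).getD (p1, p2) 0)
        = d.getD (p1, p2) 0 + (if (p1 ≠ r ∨ p2 ≠ c) ∧ 0 ≤ p1 ∧ p1 < (grid.length : Int) ∧ 0 ≤ p2 ∧ p2 < pvCols grid ∧
             r - 1 ≤ p1 ∧ p1 ≤ r + 1 ∧ c - 1 ≤ p2 ∧ p2 ≤ c + 1 then (1:Int) else 0) := by
    intro r c d
    rw [getD_foldl_delta (p1, p2)
      (fun nr => ([c - 1, c, c + 1].map (fun nc =>
          if ((nr ≠ r ∨ nc ≠ c) ∧ 0 ≤ nr ∧ nr < (grid.length : Int) ∧ 0 ≤ nc ∧ nc < pvCols grid)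
             ∧ ((p1 : Int), (p2 : Int)) = (nr, nc)
          then (1 : Int) else 0)).sum) _ (fun d' nr => hNC r c nr d') _ d]
    rw [window_sum]
  -- cell level and row level
  have hC : ∀ (d : PySem.Dict (Int × Int) Int),
      ((pvScatter grid).getD (p1, p2) 0) =
        (((PySem.List.pyRange 0 (grid.length : Int) 1).map (fun r =>
          ((PySem.List.pyRange 0 (pvCols grid) 1).map (fun c =>
            if pvAt grid (r, c) = true ∧ ((p1 ≠ r ∨ p2 ≠ c) ∧ 0 ≤ p1 ∧ p1 < (grid.length : Int) ∧ 0 ≤ p2 ∧ p2 < pvCols grid ∧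
               r - 1 ≤ p1 ∧ p1 ≤ r + 1 ∧ c - 1 ≤ p2 ∧ p2 ≤ c + 1) then (1:Int) else 0)).sum)).sum) := by
    intro d
    unfold pvScatter
    rw [getD_foldl_delta (p1, p2)
      (fun r => ((PySem.List.pyRange 0 (pvCols grid) 1).map (fun c =>
          if pvAt grid (r, c) = true ∧ ((p1 ≠ r ∨ p2 ≠ c) ∧ 0 ≤ p1 ∧ p1 < (grid.length : Int) ∧ 0 ≤ p2 ∧ p2 < pvCols grid ∧
             r - 1 ≤ p1 ∧ p1 ≤ r + 1 ∧ c - 1 ≤ p2 ∧ p2 ≤ c + 1) then (1:Int) else 0)).sum)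
      _ ?_ _ PySem.Dict.empty]
    · simp [PySem.Dict.getD_empty]
    · intro d' r
      rw [getD_foldl_delta (p1, p2)
        (fun c => if pvAt grid (r, c) = true ∧ ((p1 ≠ r ∨ p2 ≠ c) ∧ 0 ≤ p1 ∧ p1 < (grid.length : Int) ∧ 0 ≤ p2 ∧ p2 < pvCols grid ∧
             r - 1 ≤ p1 ∧ p1 ≤ r + 1 ∧ c - 1 ≤ p2 ∧ p2 ≤ c + 1) then (1:Int) else 0)
        _ ?_ _ d']
      intro d'' c
      by_cases hat : PySem.List.pyGetD (PySem.List.pyGetD grid r []) c "" == "@"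
      · rw [if_pos hat, hNR r c d'']
        have : pvAt grid (r, c) = true := hat
        simp only [this, true_and]
      · rw [if_neg hat]
        have hx : ¬ (pvAt grid (r, c) = true) := hat
        simp [hx]
  rw [hC PySem.Dict.empty, nbr_countP grid p1 p2]
  -- names
  have hstep :
      ((PySem.List.pyRange 0 (grid.length : Int) 1).map (fun r =>
        ((PySem.List.pyRange 0 (pvCols grid) 1).map (fun c =>
          if pvAt grid (r, c) = true ∧ ((p1 ≠ r ∨ p2 ≠ c) ∧ 0 ≤ p1 ∧ p1 < (grid.length : Int) ∧ 0 ≤ p2 ∧ p2 < pvCols grid ∧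
             r - 1 ≤ p1 ∧ p1 ≤ r + 1 ∧ c - 1 ≤ p2 ∧ p2 ≤ c + 1) then (1:Int) else 0)).sum)).sum
      = (((PySem.List.pyRange 0 (grid.length : Int) 1 ×ˢ PySem.List.pyRange 0 (pvCols grid) 1).map (fun q : Int × Int =>
          if pvAt grid q = true ∧ ((p1 ≠ q.1 ∨ p2 ≠ q.2) ∧ 0 ≤ p1 ∧ p1 < (grid.length : Int) ∧ 0 ≤ p2 ∧ p2 < pvCols grid ∧
             q.1 - 1 ≤ p1 ∧ p1 ≤ q.1 + 1 ∧ q.2 - 1 ≤ p2 ∧ p2 ≤ q.2 + 1) then (1:Int) else 0)).sum) := by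
    rw [show (PySem.List.pyRange 0 (grid.length : Int) 1 ×ˢ PySem.List.pyRange 0 (pvCols grid) 1)
        = (PySem.List.pyRange 0 (grid.length : Int) 1).flatMap
            (fun a => (PySem.List.pyRange 0 (pvCols grid) 1).map (Prod.mk a)) from rfl,
      ← sum_flatMap_pv]
    simp only [List.map_map]
    rfl
  rw [hstep]
  have hFP : ∀ q : Int × Int,
      (if pvAt grid q = true ∧ ((p1 ≠ q.1 ∨ p2 ≠ q.2) ∧ 0 ≤ p1 ∧ p1 < (grid.length : Int) ∧ 0 ≤ p2 ∧ p2 < pvCols grid ∧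
          q.1 - 1 ≤ p1 ∧ p1 ≤ q.1 + 1 ∧ q.2 - 1 ≤ p2 ∧ p2 ≤ q.2 + 1) then (1:Int) else 0)
      = if (pvAt grid q && decide ((p1 ≠ q.1 ∨ p2 ≠ q.2) ∧ 0 ≤ p1 ∧ p1 < (grid.length : Int) ∧ 0 ≤ p2 ∧ p2 < pvCols grid ∧
          q.1 - 1 ≤ p1 ∧ p1 ≤ q.1 + 1 ∧ q.2 - 1 ≤ p2 ∧ p2 ≤ q.2 + 1)) = true then (1:Int) else 0 := by
    intro q
    exact if_congr (by simp) rfl rfl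
  rw [List.map_congr_left (fun q _ => hFP q), PySem.List.sum_map_ite_one_zero]
  -- it remains to compare the two Nat counts
  have hcellmem : ∀ a b : Int,
      ((a, b) : Int × Int) ∈ (PySem.List.pyRange 0 (grid.length : Int) 1 ×ˢ PySem.List.pyRange 0 (pvCols grid) 1)
        ↔ (0 ≤ a ∧ a < (grid.length : Int)) ∧ (0 ≤ b ∧ b < pvCols grid) := by
    intro a b
    simp only [List.mem_product, PySem.List.mem_pyRange_one]
  have hcount :
      (PySem.List.pyRange 0 (grid.length : Int) 1 ×ˢ PySem.List.pyRange 0 (pvCols grid) 1).countP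
        (fun q : Int × Int => pvAt grid q && decide ((p1 ≠ q.1 ∨ p2 ≠ q.2) ∧ 0 ≤ p1 ∧ p1 < (grid.length : Int) ∧ 0 ≤ p2 ∧ p2 < pvCols grid ∧
          q.1 - 1 ≤ p1 ∧ p1 ≤ q.1 + 1 ∧ q.2 - 1 ≤ p2 ∧ p2 ≤ q.2 + 1))
      = pvD8.countP (fun d => decide
        ((0 ≤ p1 + d.1 ∧ p1 + d.1 < (grid.length : Int) ∧
          0 ≤ p2 + d.2 ∧ p2 + d.2 < pvCols grid) ∧
         pvAt grid (p1 + d.1, p2 + d.2) = true)) := by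
    have hinj : Function.Injective (fun d : Int × Int => (p1 + d.1, p2 + d.2)) := by
      rintro ⟨a, b⟩ ⟨c, e⟩ h
      simp only [Prod.ext_iff] at h ⊢
      omega
    have hd8nodup : pvD8.Nodup := by decide
    have hperm :
        ((PySem.List.pyRange 0 (grid.length : Int) 1 ×ˢ PySem.List.pyRange 0 (pvCols grid) 1).filter
          (fun q : Int × Int => pvAt grid q && decide ((p1 ≠ q.1 ∨ p2 ≠ q.2) ∧ 0 ≤ p1 ∧ p1 < (grid.length : Int) ∧ 0 ≤ p2 ∧ p2 < pvCols grid ∧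
            q.1 - 1 ≤ p1 ∧ p1 ≤ q.1 + 1 ∧ q.2 - 1 ≤ p2 ∧ p2 ≤ q.2 + 1))).Perm
        ((pvD8.map (fun d : Int × Int => (p1 + d.1, p2 + d.2))).filter
          (fun q : Int × Int => decide (0 ≤ q.1 ∧ q.1 < (grid.length : Int) ∧ 0 ≤ q.2 ∧ q.2 < pvCols grid) && pvAt grid q)) := by
      refine (List.perm_ext_iff_of_nodup
        (List.Nodup.filter _ (List.Nodup.product (PySem.List.nodup_pyRange_one _ _) (PySem.List.nodup_pyRange_one _ _)))
        (List.Nodup.filter _ (hd8nodup.map hinj))).mpr ?_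
      rintro ⟨q1, q2⟩
      simp only [List.mem_filter, hcellmem, Bool.and_eq_true, decide_eq_true_iff, List.mem_map]
      constructor
      · rintro ⟨⟨⟨hq1a, hq1b⟩, hq2a, hq2b⟩, hat, hcond⟩
        refine ⟨⟨(q1 - p1, q2 - p2), mem_d8' _ _ (by omega),
          by simp only [Prod.ext_iff]; constructor <;> omega⟩, by omega, hat⟩
      · rintro ⟨⟨⟨d1, d2⟩, hd, hsh⟩, hb, hat⟩
        have hf := d8_facts' d1 d2 hd
        simp only [Prod.ext_iff] at hsh
        refine ⟨⟨⟨by omega, by omega⟩, by omega, by omega⟩, hat, ?_⟩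
        omega
    calc (PySem.List.pyRange 0 (grid.length : Int) 1 ×ˢ PySem.List.pyRange 0 (pvCols grid) 1).countP
          (fun q : Int × Int => pvAt grid q && decide ((p1 ≠ q.1 ∨ p2 ≠ q.2) ∧ 0 ≤ p1 ∧ p1 < (grid.length : Int) ∧ 0 ≤ p2 ∧ p2 < pvCols grid ∧
            q.1 - 1 ≤ p1 ∧ p1 ≤ q.1 + 1 ∧ q.2 - 1 ≤ p2 ∧ p2 ≤ q.2 + 1))
        = ((PySem.List.pyRange 0 (grid.length : Int) 1 ×ˢ PySem.List.pyRange 0 (pvCols grid) 1).filter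
            (fun q : Int × Int => pvAt grid q && decide ((p1 ≠ q.1 ∨ p2 ≠ q.2) ∧ 0 ≤ p1 ∧ p1 < (grid.length : Int) ∧ 0 ≤ p2 ∧ p2 < pvCols grid ∧
              q.1 - 1 ≤ p1 ∧ p1 ≤ q.1 + 1 ∧ q.2 - 1 ≤ p2 ∧ p2 ≤ q.2 + 1))).length := List.countP_eq_length_filter
      _ = ((pvD8.map (fun d : Int × Int => (p1 + d.1, p2 + d.2))).filter
            (fun q : Int × Int => decide (0 ≤ q.1 ∧ q.1 < (grid.length : Int) ∧ 0 ≤ q.2 ∧ q.2 < pvCols grid) && pvAt grid q)).length :=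
          hperm.length_eq
      _ = (pvD8.map (fun d : Int × Int => (p1 + d.1, p2 + d.2))).countP
            (fun q : Int × Int => decide (0 ≤ q.1 ∧ q.1 < (grid.length : Int) ∧ 0 ≤ q.2 ∧ q.2 < pvCols grid) && pvAt grid q) :=
          List.countP_eq_length_filter.symm
      _ = pvD8.countP ((fun q : Int × Int => decide (0 ≤ q.1 ∧ q.1 < (grid.length : Int) ∧ 0 ≤ q.2 ∧ q.2 < pvCols grid) && pvAt grid q)
            ∘ (fun d : Int × Int => (p1 + d.1, p2 + d.2))) := List.countP_map
      _ = pvD8.countP (fun d => decide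
            ((0 ≤ p1 + d.1 ∧ p1 + d.1 < (grid.length : Int) ∧
              0 ≤ p2 + d.2 ∧ p2 + d.2 < pvCols grid) ∧
             pvAt grid (p1 + d.1, p2 + d.2) = true)) := by
          refine List.countP_congr ?_
          rintro ⟨d1, d2⟩ hd
          cases hat : pvAt grid (p1 + d1, p2 + d2) <;>
            simp [Function.comp, hat]
  rw [hcount]

lemma alt_eq (grid : List (List String)) :
    check_grid_accessible_alt grid =
      (PySem.List.pyRange 0 (grid.length : Int) 1).foldl (fun acc r =>
        (PySem.List.pyRange 0 (pvCols grid) 1).foldl (fun acc c =>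
          if pvAt grid (r, c) = true ∧ (pvScatter grid).getD (r, c) 0 < 4
          then acc + 1 else acc) acc) 0 := rfl

lemma cn_eq (grid : List (List String)) (row col : Int) :
    check_neighbors grid row col = decide (pvNbr grid row col < 4) := rfl

lemma a_eq (grid : List (List String)) :
    check_grid_accessible grid =
      (PySem.List.pyRange 0 (grid.length : Int) 1).foldl (fun acc r =>
        (PySem.List.pyRange 0 (pvCols grid) 1).foldl (fun acc c =>
          if pvAt grid (r, c) = true then
            if check_neighbors grid r c then acc + 1 else acc
          else acc) acc) 0 := rfl

-- ===== VERDICT (by name: the statement is the Claim_ definition above) =====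
theorem check_grid_accessible_spec : Claim_equal_check_grid_accessible := by
  intro grid _ _
  unfold Spec_check_grid_accessible
  rw [a_eq, alt_eq]
  refine PySem.List.foldl_congr_mem _ _ _ _ ?_
  intro acc r hr
  refine PySem.List.foldl_congr_mem _ _ _ _ ?_
  intro acc' c hc
  rw [PySem.List.mem_pyRange_one] at hr hc
  rw [cn_eq, scatter_getD grid r c hr.1 hr.2 hc.1 hc.2]
  by_cases hat : pvAt grid (r, c) = true <;> by_cases hlt : pvNbr grid r c < 4 <;>
    simp [hat, hlt]
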